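-- pv_equiv track=rewrite | github.com/DarkKing-10/fichat20 | app.py | agrupar_magias_por_nivel
-- ===== SOURCE A (Python) =====
-- def agrupar_magias_por_nivel(magias):
--     niveis = {}
--     for magia in magias:
--         nivel = magia["nivel"]
--         if nivel not in niveis:
--             niveis[nivel] = []
--         niveis[nivel].append(magia)
--     return dict(sorted(niveis.items()))
-- ===== SOURCE B (Python) =====
-- def agrupar_magias_por_nivel(magias):
--     ordenadas = sorted(magias, key=lambda m: m["nivel"])
--     grupos = []
--     for magia in ordenadas:
--         nivel = magia["nivel"]
--         if grupos and grupos[-1][0] == nivel: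
--             grupos[-1][1].append(magia)
--         else:
--             grupos.append((nivel, [magia]))
--     return dict(grupos)
-- ===== Notes on version B (the rewrite author's own statement) =====
-- stated objective: alternative
-- what changed: B sorts the list once by level (stable sort keeps input order within a level) and builds the groups in one run scan over the sorted list, instead of A's dict accumulation followed by a final sort of the items.
import Mathlib
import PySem

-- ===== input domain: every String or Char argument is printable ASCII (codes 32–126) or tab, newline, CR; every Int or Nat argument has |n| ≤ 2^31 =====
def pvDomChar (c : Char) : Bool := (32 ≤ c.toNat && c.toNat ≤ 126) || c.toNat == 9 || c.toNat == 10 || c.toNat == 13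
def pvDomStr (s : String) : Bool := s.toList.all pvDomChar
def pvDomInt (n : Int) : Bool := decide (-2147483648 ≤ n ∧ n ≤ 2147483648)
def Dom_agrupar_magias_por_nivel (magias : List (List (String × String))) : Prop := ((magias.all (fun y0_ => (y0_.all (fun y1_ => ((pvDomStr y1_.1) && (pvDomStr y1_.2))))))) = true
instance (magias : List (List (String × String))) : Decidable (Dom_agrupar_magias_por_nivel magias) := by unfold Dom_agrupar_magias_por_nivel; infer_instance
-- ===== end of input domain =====

-- B groups by sorting once (stable) and scanning runs, instead of A's dict build + final key sort; equal return value proved on Pre_.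

-- ===== PORT A =====
-- magia["nivel"]: first-match lookup in the association list (KeyError, i.e. none, when absent — excluded by Pre_)
def pvNivel (m : List (String × String)) : String :=
  (((PySem.Dict.mk m).get? "nivel").getD "")

def agrupar_magias_por_nivel (magias : List (List (String × String))) : List (String × List (List (String × String))) :=
  let niveis := magias.foldl (fun d magia =>
      let nivel := pvNivel magia
      let d := if d.contains nivel then d else d.insert nivel ([] : List (List (String × String)))
      d.modify nivel [] (fun g => g ++ [magia]))
    PySem.Dict.empty
  -- sorted(niveis.items()): dict keys are distinct, so Python's tuple comparison only ever reads the key — exact here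
  PySem.List.sorted niveis.items (fun p => p.1) false

-- ===== PORT B =====
def agrupar_magias_por_nivel_alt (magias : List (List (String × String))) : List (String × List (List (String × String))) :=
  let ordenadas := PySem.List.sorted magias pvNivel false
  -- run scan: append to the last group while the level repeats ('grupos[-1][1].append'), else open a new group
  let grupos := ordenadas.foldl (fun gs magia =>
      let nivel := pvNivel magia
      match gs.getLast? with
      | some (k, g) => if k == nivel then gs.dropLast ++ [(k, g ++ [magia])] else gs ++ [(nivel, [magia])]
      | none => [(nivel, [magia])])
    []
  -- dict(grupos): the run keys are pairwise distinct, so this is the pair list itself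
  grupos

-- ===== PRECONDITION & SPEC =====
-- Pre_ excludes exactly the inputs where some magia lacks the key "nivel": there Python's magia["nivel"] raises KeyError.
def Pre_agrupar_magias_por_nivel (magias : List (List (String × String))) : Prop :=
  ∀ m ∈ magias, ((PySem.Dict.mk m).get? "nivel").isSome = true
instance (magias : List (List (String × String))) : Decidable (Pre_agrupar_magias_por_nivel magias) := by unfold Pre_agrupar_magias_por_nivel; infer_instance

def pvWitness_agrupar_magias_por_nivel : (List (List (String × String))) :=
  [[("nivel", "1"), ("nome", "luz")], [("nivel", "0"), ("nome", "ra")], [("nivel", "1"), ("nome", "som")]]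

def Spec_agrupar_magias_por_nivel (magias : List (List (String × String))) (out : List (String × List (List (String × String)))) : Prop := out = agrupar_magias_por_nivel_alt magias
instance (magias : List (List (String × String))) (out : List (String × List (List (String × String)))) : Decidable (Spec_agrupar_magias_por_nivel magias out) := by unfold Spec_agrupar_magias_por_nivel; infer_instance

-- ===== CLAIM (what is proved, stated in full; the proofs are below) =====
def Claim_equal_agrupar_magias_por_nivel : Prop := ∀ (magias : List (List (String × String))), Dom_agrupar_magias_por_nivel magias → Pre_agrupar_magias_por_nivel magias → Spec_agrupar_magias_por_nivel magias (agrupar_magias_por_nivel magias)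

-- ===== LEMMAS AND PROOFS =====

-- A's loop step: the 'insert [] if absent' is absorbed by the subsequent modify.
theorem pv_step_absorb (d : PySem.Dict String (List (List (String × String)))) (k : String) (m : List (String × String)) :
    (if d.contains k then d else d.insert k ([] : List (List (String × String)))).modify k [] (fun g => g ++ [m])
      = d.modify k [] (fun g => g ++ [m]) := by
  by_cases h : d.contains k = true
  · simp [h]
  · have h' : d.contains k = false := by simpa using h
    simp [h', PySem.Dict.modify, PySem.Dict.insert_insert_self, PySem.Dict.getD_insert_self,
      PySem.Dict.getD_of_not_contains]

-- the items of A's dict: first-occurrence-ordered distinct levels, each with its input-order group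

-- the items of A's dict: first-occurrence-ordered distinct levels, each with its input-order group
theorem pv_A_items (magias : List (List (String × String))) :
    (magias.foldl (fun d m => d.modify (pvNivel m) [] (fun g => g ++ [m]))
        (PySem.Dict.empty : PySem.Dict String (List (List (String × String))))).items
      = (PySem.Set.ofList (magias.map pvNivel)).map
          (fun k => (k, magias.filter (fun m => pvNivel m == k))) := by
  set D := magias.foldl (fun d m => d.modify (pvNivel m) [] (fun g => g ++ [m]))
      (PySem.Dict.empty : PySem.Dict String (List (List (String × String)))) with hD
  have hnd : D.keys.Nodup := by
    exact PySem.Dict.nodup_keys_foldl_modify_key magias pvNivel [] (fun _ m => fun g => g ++ [m]) _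
      (by simp)
  have hkeys : D.keys = PySem.Set.ofList (magias.map pvNivel) := by
    rw [hD, PySem.Dict.keys_foldl_modify_key]
    simp [PySem.Dict.keys_empty, PySem.Set.update_nil_left]
  have hgetD : ∀ k, D.getD k [] = magias.filter (fun m => pvNivel m == k) := by
    intro k
    have hfold : D = (magias.map (fun m => (pvNivel m, m))).foldl
        (fun d p => d.modify p.1 [] (fun g => g ++ [p.2])) PySem.Dict.empty := by
      rw [hD, List.foldl_map]
    rw [hfold, PySem.Dict.getD_foldl_modify_append]
    simp [List.filter_map, Function.comp_def]
  rw [PySem.Dict.items_eq_map_keys D hnd ([] : List (List (String × String))), hkeys]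
  exact List.map_congr_left (fun k _ => by rw [hgetD k])

-- closed form of port A: sorted distinct levels, each with its input-order group

-- closed form of port A: sorted distinct levels, each paired with its input-order group
theorem pv_A_eq (magias : List (List (String × String))) :
    agrupar_magias_por_nivel magias
      = (PySem.List.sorted (PySem.Set.ofList (magias.map pvNivel)) (fun k => k) false).map
          (fun k => (k, magias.filter (fun m => pvNivel m == k))) := by
  show PySem.List.sorted (magias.foldl (fun d magia =>
      (if d.contains (pvNivel magia) then d
        else d.insert (pvNivel magia) ([] : List (List (String × String)))).modify
        (pvNivel magia) [] (fun g => g ++ [magia])) PySem.Dict.empty).items (fun p => p.1) false = _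
  rw [PySem.List.foldl_congr_mem magias _ (fun d m => d.modify (pvNivel m) [] (fun g => g ++ [m]))
      PySem.Dict.empty (fun d m _ => pv_step_absorb d (pvNivel m) m), pv_A_items]
  apply PySem.List.sorted_eq_of_perm_of_pairwise_lt
  · exact ((PySem.List.sorted_perm _ _ _).map _)
  · rw [List.pairwise_map]
    exact (PySem.List.sorted_ofList_pairwise_lt (magias.map pvNivel)).imp (fun h => h)

-- B's run-scan loop as a structural recursion (proof helper; not part of either port)

-- B's run-scan loop as a structural recursion (proof helper; not part of either port)
def pvGroupRuns (k : String) (g : List (List (String × String))) :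
    List (List (String × String)) → List (String × List (List (String × String)))
  | [] => [(k, g)]
  | m :: t => if pvNivel m == k then pvGroupRuns k (g ++ [m]) t
              else (k, g) :: pvGroupRuns (pvNivel m) [m] t

theorem pv_foldl_runs (t : List (List (String × String)))
    (pre : List (String × List (List (String × String)))) (k : String)
    (g : List (List (String × String))) :
    t.foldl (fun gs magia =>
        match gs.getLast? with
        | some (k, g) => if k == pvNivel magia then gs.dropLast ++ [(k, g ++ [magia])]
                         else gs ++ [(pvNivel magia, [magia])]
        | none => [(pvNivel magia, [magia])]) (pre ++ [(k, g)])
      = pre ++ pvGroupRuns k g t := by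
  induction t generalizing pre k g with
  | nil => simp [pvGroupRuns]
  | cons m t ih =>
    rw [List.foldl_cons]
    have hlast : (pre ++ [(k, g)]).getLast? = some (k, g) := List.getLast?_concat
    have hdrop : (pre ++ [(k, g)]).dropLast = pre := List.dropLast_concat
    simp only [hlast, hdrop]
    by_cases h : pvNivel m == k
    · have hk : k == pvNivel m := by simpa [BEq.comm] using h
      rw [if_pos hk, ih, pvGroupRuns, if_pos h]
    · have hk : ¬ (k == pvNivel m) := by simpa [BEq.comm] using h
      rw [if_neg hk, show pre ++ [(k, g)] ++ [(pvNivel m, [m])] = (pre ++ [(k, g)]) ++ [(pvNivel m, [m])] by simp,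
        ih, pvGroupRuns, if_neg h]
      simp

-- filter commutes with ordered dedup
theorem pv_ofList_filter (l : List String) (p : String → Bool) :
    (PySem.Set.ofList l).filter p = PySem.Set.ofList (l.filter p) := by
  induction l with
  | nil => simp [PySem.Set.ofList_nil]
  | cons x xs ih =>
    rw [PySem.Set.ofList_cons, List.filter_cons]
    by_cases hx : p x = true
    · rw [if_pos hx, List.filter_cons, if_pos hx, PySem.Set.ofList_cons, ← ih]
      simp only [PySem.Set.discard, List.filter_filter]
      congr 1
      exact List.filter_congr (fun y _ => by rw [Bool.and_comm])
    · rw [if_neg hx, List.filter_cons, if_neg hx, ← ih]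
      simp only [PySem.Set.discard, List.filter_filter]
      exact List.filter_congr (fun y _ => by
        by_cases hy : p y = true
        · have : (y == x) = false := by
            rcases beq_iff_eq.mp.mt (fun he : (y == x) = true => hx (beq_iff_eq.mp he ▸ hy)) with h
            · simpa using fun he => h (by simp [he])
          simp [hy, this]
        · simp [Bool.eq_false_iff.mpr hy])

-- ordered dedup of a ≤-sorted list is strictly increasing
theorem pv_ofList_pairwise_lt (l : List String) (h : l.Pairwise (· ≤ ·)) :
    (PySem.Set.ofList l).Pairwise (· < ·) := by
  induction l with
  | nil => simp [PySem.Set.ofList_nil]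
  | cons x xs ih =>
    rw [PySem.Set.ofList_cons]
    rcases List.pairwise_cons.mp h with ⟨hx, hxs⟩
    refine List.pairwise_cons.mpr ⟨?_, ?_⟩
    · intro y hy
      rcases (PySem.Set.mem_discard _ _ _).mp hy with ⟨hyl, hne⟩
      exact lt_of_le_of_ne (hx y ((PySem.Set.mem_ofList _ _).mp hyl)) (Ne.symm hne)
    · exact (ih hxs).sublist (show _ from List.filter_sublist)

-- the run scan over a key-sorted list produces each distinct level, in order, with its group

-- the run scan over a key-sorted tail produces each distinct level, in order, with its group
theorem pv_groupRuns_eq (t : List (List (String × String))) (k : String)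
    (g : List (List (String × String)))
    (h1 : t.Pairwise (fun a b => pvNivel a ≤ pvNivel b))
    (h2 : ∀ m ∈ t, k ≤ pvNivel m) :
    pvGroupRuns k g t
      = (k, g ++ t.filter (fun m => pvNivel m == k)) ::
        (PySem.Set.ofList ((t.filter (fun m => !(pvNivel m == k))).map pvNivel)).map
          (fun k' => (k', t.filter (fun m => pvNivel m == k'))) := by
  induction t generalizing k g with
  | nil => simp [pvGroupRuns]
  | cons m t ih =>
    rcases List.pairwise_cons.mp h1 with ⟨hm, ht⟩
    by_cases h : (pvNivel m == k) = true
    · have hk : pvNivel m = k := beq_iff_eq.mp h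
      rw [pvGroupRuns, if_pos h, ih k (g ++ [m]) ht (fun x hx => hk ▸ hm x hx)]
      rw [List.filter_cons, List.filter_cons]
      simp only [h, Bool.not_true, Bool.false_eq_true, if_true, if_false]
      congr 1
      · simp
      · apply List.map_congr_left
        intro k' hk'
        rcases List.mem_map.mp ((PySem.Set.mem_ofList _ _).mp hk') with ⟨x, hx, rfl⟩
        have hne : pvNivel m ≠ pvNivel x := by
          have := (List.mem_filter.mp hx).2
          simp only [Bool.not_eq_eq_eq_not, Bool.not_true, beq_eq_false_iff_ne] at this
          exact hk ▸ this.symm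
        rw [List.filter_cons, if_neg (by simpa using hne)]
    · have hk : pvNivel m ≠ k := fun he => h (beq_iff_eq.mpr he)
      have hklt : k < pvNivel m := lt_of_le_of_ne (h2 m (by simp)) (Ne.symm hk)
      have htgt : ∀ x ∈ t, k < pvNivel x := fun x hx => lt_of_lt_of_le hklt (hm x hx)
      rw [pvGroupRuns, if_neg (by simpa using h), ih (pvNivel m) [m] ht hm]
      have hfm : List.filter (fun x => pvNivel x == k) (m :: t) = [] := by
        rw [List.filter_eq_nil_iff]
        intro a ha
        rcases List.mem_cons.mp ha with rfl | ha'
        · simpa using hk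
        · simpa using ne_of_gt (htgt a ha')
      have hfneg : List.filter (fun x => !(pvNivel x == k)) (m :: t) = m :: t := by
        rw [List.filter_eq_self]
        intro a ha
        rcases List.mem_cons.mp ha with rfl | ha'
        · simpa using hk
        · simpa using ne_of_gt (htgt a ha')
      rw [hfm, hfneg, List.append_nil, List.map_cons, PySem.Set.ofList_cons]
      simp only [PySem.Set.discard]
      rw [pv_ofList_filter, List.filter_map]
      simp only [Function.comp_def, List.map_cons]
      congr 1
      congr 1
      · rw [List.filter_cons, if_pos (by simp)]
        simp
      · apply List.map_congr_left
        intro k' hk'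
        rcases List.mem_map.mp ((PySem.Set.mem_ofList _ _).mp hk') with ⟨x, hx, rfl⟩
        have hne : pvNivel m ≠ pvNivel x := by
          have := (List.mem_filter.mp hx).2
          simp only [Bool.not_eq_eq_eq_not, Bool.not_true, beq_eq_false_iff_ne] at this
          exact this.symm
        rw [List.filter_cons, if_neg (by simpa using hne)]

-- closed form of port B's loop on a key-sorted list
theorem pv_B_eq (ys : List (List (String × String)))
    (h : ys.Pairwise (fun a b => pvNivel a ≤ pvNivel b)) :
    ys.foldl (fun gs magia =>
        match gs.getLast? with
        | some (k, g) => if k == pvNivel magia then gs.dropLast ++ [(k, g ++ [magia])]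
                         else gs ++ [(pvNivel magia, [magia])]
        | none => [(pvNivel magia, [magia])]) []
      = (PySem.Set.ofList (ys.map pvNivel)).map
          (fun k => (k, ys.filter (fun m => pvNivel m == k))) := by
  cases ys with
  | nil => simp [PySem.Set.ofList_nil]
  | cons m t =>
    rcases List.pairwise_cons.mp h with ⟨hm, ht⟩
    rw [List.foldl_cons]
    show List.foldl _ ([] ++ [(pvNivel m, [m])]) t = _
    refine (pv_foldl_runs t [] (pvNivel m) [m]).trans ?_
    rw [List.nil_append, pv_groupRuns_eq t (pvNivel m) [m] ht hm]
    rw [List.map_cons, PySem.Set.ofList_cons]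
    simp only [PySem.Set.discard]
    rw [pv_ofList_filter, List.filter_map]
    simp only [Function.comp_def, List.map_cons]
    congr 1
    · rw [List.filter_cons, if_pos (by simp)]
      simp
    · apply List.map_congr_left
      intro k' hk'
      rcases List.mem_map.mp ((PySem.Set.mem_ofList _ _).mp hk') with ⟨x, hx, rfl⟩
      have hne : pvNivel m ≠ pvNivel x := by
        have := (List.mem_filter.mp hx).2
        simp only [Bool.not_eq_eq_eq_not, Bool.not_true, beq_eq_false_iff_ne] at this
        exact this.symm
      rw [List.filter_cons, if_neg (by simpa using hne)]

-- stability of the insertion step: one level's elements keep their relative order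
theorem pv_insertBy_filter (x : List (String × String)) (acc : List (List (String × String)))
    (k : String) (hacc : acc.Pairwise (fun a b => pvNivel a ≤ pvNivel b)) :
    (PySem.List.insertBy (fun a b => decide (pvNivel a < pvNivel b)) x acc).filter
        (fun y => pvNivel y == k)
      = if pvNivel x == k then acc.filter (fun y => pvNivel y == k) ++ [x]
        else acc.filter (fun y => pvNivel y == k) := by
  induction acc with
  | nil =>
    by_cases hxk : (pvNivel x == k) = true <;>
      simp [PySem.List.insertBy, hxk]
  | cons y ys ih =>
    rcases List.pairwise_cons.mp hacc with ⟨hy, hys⟩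
    rw [show PySem.List.insertBy (fun a b => decide (pvNivel a < pvNivel b)) x (y :: ys)
        = if decide (pvNivel x < pvNivel y) then x :: y :: ys
          else y :: PySem.List.insertBy (fun a b => decide (pvNivel a < pvNivel b)) x ys
        from rfl]
    by_cases hb : decide (pvNivel x < pvNivel y) = true
    · rw [if_pos hb]
      have hlt : pvNivel x < pvNivel y := of_decide_eq_true hb
      by_cases hxk : (pvNivel x == k) = true
      · have hk : pvNivel x = k := beq_iff_eq.mp hxk
        have hnil : (y :: ys).filter (fun m => pvNivel m == k) = [] := by
          rw [List.filter_eq_nil_iff]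
          intro a ha
          rcases List.mem_cons.mp ha with rfl | ha'
          · simpa using (ne_of_lt (hk ▸ hlt)).symm
          · simpa using (ne_of_lt (hk ▸ lt_of_lt_of_le hlt (hy a ha'))).symm
        rw [List.filter_cons, if_pos hxk, hnil, if_pos hxk]
        rfl
      · rw [List.filter_cons, if_neg hxk, if_neg hxk]
    · rw [if_neg hb]
      rw [List.filter_cons, List.filter_cons, ih hys]
      by_cases hyk : (pvNivel y == k) = true <;>
        by_cases hxk : (pvNivel x == k) = true <;>
        simp [hyk, hxk]

-- stability of the sort: elements of one level keep their input order
theorem pv_sorted_filter (xs : List (List (String × String))) (k : String) :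
    (PySem.List.sorted xs pvNivel false).filter (fun m => pvNivel m == k)
      = xs.filter (fun m => pvNivel m == k) := by
  induction xs using List.reverseRecOn with
  | nil => simp [PySem.List.sorted]
  | append_singleton xs x ih =>
    have hs : PySem.List.sorted (xs ++ [x]) pvNivel false
        = PySem.List.insertBy (fun a b => decide (pvNivel a < pvNivel b)) x
            (PySem.List.sorted xs pvNivel false) := by
      simp [PySem.List.sorted, List.foldl_append]
    rw [hs, pv_insertBy_filter x _ k (PySem.List.sorted_pairwise _ _), List.filter_append]
    by_cases hxk : (pvNivel x == k) = true <;> simp [hxk, ih]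

-- the distinct levels of the sorted list are the sorted distinct levels
theorem pv_keys_set_eq (magias : List (List (String × String))) :
    PySem.Set.ofList ((PySem.List.sorted magias pvNivel false).map pvNivel)
      = PySem.List.sorted (PySem.Set.ofList (magias.map pvNivel)) (fun k => k) false := by
  symm
  apply PySem.List.sorted_eq_of_perm_of_pairwise_lt
  · apply (List.perm_ext_iff_of_nodup (PySem.Set.nodup_ofList _) (PySem.Set.nodup_ofList _)).mpr
    intro a
    simp only [PySem.Set.mem_ofList, List.mem_map]
    constructor
    · rintro ⟨m, hm, rfl⟩
      exact ⟨m, (PySem.List.mem_sorted _ _ _ _).mp hm, rfl⟩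
    · rintro ⟨m, hm, rfl⟩
      exact ⟨m, (PySem.List.mem_sorted _ _ _ _).mpr hm, rfl⟩
  · exact pv_ofList_pairwise_lt _ (PySem.List.sorted_map_key_pairwise _ _)

-- ===== VERDICT (by name: the statement is the Claim_ definition above) =====
theorem agrupar_magias_por_nivel_spec : Claim_equal_agrupar_magias_por_nivel := by
  intro magias _ _
  unfold Spec_agrupar_magias_por_nivel
  rw [pv_A_eq]
  show _ = (PySem.List.sorted magias pvNivel false).foldl (fun gs magia =>
      match gs.getLast? with
      | some (k, g) => if k == pvNivel magia then gs.dropLast ++ [(k, g ++ [magia])]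
                       else gs ++ [(pvNivel magia, [magia])]
      | none => [(pvNivel magia, [magia])]) []
  rw [pv_B_eq _ (PySem.List.sorted_pairwise _ _), pv_keys_set_eq]
  exact List.map_congr_left (fun k _ => by rw [pv_sorted_filter])
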